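-- pv_equiv track=rewrite | github.com/UpDavo/capig-form | capig_form/services/tamano_empresas_job.py | _detect_blocks
-- ===== SOURCE A (Python) =====
-- import unicodedata
-- from typing import Dict, List, Tuple
--
-- def _normalize_label(value: str) -> str:
--     text = str(value or "").strip().upper()
--     text = unicodedata.normalize("NFD", text)
--     text = "".join(ch for ch in text if unicodedata.category(ch) != "Mn")
--     text = text.replace(" ", "_")
--     return text
--
-- def _find_col(headers: List[str], needle: str) -> int:
--     target = _normalize_label(needle)
--     for idx, h in enumerate(headers):
--         if target in _normalize_label(h):
--             return idx
--     return -1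
--
-- def _detect_blocks(data: List[List[str]]) -> List[Tuple[int, List[str], List[List[str]]]]:
--     header_idxs: List[int] = []
--     for idx, row in enumerate(data):
--         if not row:
--             continue
--         has_ruc = _find_col(row, "RUC") >= 0
--         has_fecha = _find_col(row, "FECHA_AFILIACION") >= 0
--         has_tamano = _find_col(row, "TAMANO") >= 0
--         if has_ruc and (has_fecha or has_tamano):
--             header_idxs.append(idx)
--
--     blocks: List[Tuple[int, List[str], List[List[str]]]] = []
--     for pos, header_idx in enumerate(header_idxs):
--         next_idx = header_idxs[pos + 1] if pos + 1 < len(header_idxs) else len(data)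
--         blocks.append((header_idx, data[header_idx], data[header_idx + 1 : next_idx]))
--     return blocks
-- ===== SOURCE B (Python) =====
-- import unicodedata
-- from typing import List, Tuple
--
-- def _normalize_label(value: str) -> str:
--     text = str(value or "").strip().upper()
--     text = unicodedata.normalize("NFD", text)
--     text = "".join(ch for ch in text if unicodedata.category(ch) != "Mn")
--     return text.replace(" ", "_")
--
-- def _has_col(row: List[str], needle: str) -> bool:
--     target = _normalize_label(needle)
--     return any(target in _normalize_label(h) for h in row)
--
-- def _is_header(row: List[str]) -> bool:
--     return _has_col(row, "RUC") and (_has_col(row, "FECHA_AFILIACION") or _has_col(row, "TAMANO"))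
--
-- def _detect_blocks(data: List[List[str]]) -> List[Tuple[int, List[str], List[List[str]]]]:
--     blocks: List[Tuple[int, List[str], List[List[str]]]] = []
--     cur = None  # the open block: (header index, header row, accumulated data rows)
--     for idx, row in enumerate(data):
--         if _is_header(row):
--             if cur is not None:
--                 blocks.append(cur)
--             cur = (idx, row, [])
--         elif cur is not None:
--             cur = (cur[0], cur[1], cur[2] + [row])
--     if cur is not None:
--         blocks.append(cur)
--     return blocks
-- ===== Notes on version B (the rewrite author's own statement) =====
-- stated objective: alternative
-- what changed: A makes two passes (collect all header indices, then re-index the data with slices between consecutive header indices); B makes a single pass that keeps the currently open block (header index, header row, accumulated data rows) and flushes it whenever a new header row is found.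
import Mathlib
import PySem

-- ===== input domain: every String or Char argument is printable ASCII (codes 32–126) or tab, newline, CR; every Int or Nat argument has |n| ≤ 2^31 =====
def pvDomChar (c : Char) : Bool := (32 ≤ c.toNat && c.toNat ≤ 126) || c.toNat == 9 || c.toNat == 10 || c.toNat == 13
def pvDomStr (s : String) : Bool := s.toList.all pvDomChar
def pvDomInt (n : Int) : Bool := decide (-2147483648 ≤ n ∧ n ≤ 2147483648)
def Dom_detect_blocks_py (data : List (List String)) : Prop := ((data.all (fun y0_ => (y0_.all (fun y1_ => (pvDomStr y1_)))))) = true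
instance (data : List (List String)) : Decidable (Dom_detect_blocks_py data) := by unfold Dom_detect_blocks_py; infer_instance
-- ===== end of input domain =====

-- B is a single pass keeping the currently open block instead of A's two passes (collect header
-- indices, then re-index and slice); equivalence of the two decompositions is proved for all inputs.

-- ===== PORT A =====
-- _normalize_label: `str(value or "")` is the identity on str input ("" or "" == ""), and on the
-- printable-ASCII domain NFD normalization is the identity and no character has category Mn, so
-- those two lines are the identity; exact there.
def pvNorm (s : String) : String :=
  PySem.Str.replace (PySem.Str.upper (PySem.Str.strip s)) " " "_"

-- the early-return `for idx, h in enumerate(headers)` loop of _find_col, with running index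
def findColAux (target : String) : List String → Int → Int
  | [], _ => -1
  | h :: t, idx => if PySem.Str.isIn target (pvNorm h) then idx else findColAux target t (idx + 1)

def find_col (headers : List String) (needle : String) : Int :=
  findColAux (pvNorm needle) headers 0

def detect_blocks_py (data : List (List String)) : List (Int × List String × List (List String)) :=
  let header_idxs : List Int :=
    (PySem.List.enumerate data 0).foldl (fun acc p =>
      if p.2 = [] then acc
      else if find_col p.2 "RUC" ≥ 0 ∧
              (find_col p.2 "FECHA_AFILIACION" ≥ 0 ∨ find_col p.2 "TAMANO" ≥ 0)
           then acc ++ [p.1] else acc) []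
  (PySem.List.enumerate header_idxs 0).foldl (fun bs q =>
      let next : Int :=
        if q.1 + 1 < PySem.List.len header_idxs
        then PySem.List.pyGetD header_idxs (q.1 + 1) 0
        else PySem.List.len data
      bs ++ [(q.2, PySem.List.pyGetD data q.2 [],
              PySem.List.slice data (some (q.2 + 1)) (some next))]) []

-- ===== PORT B =====
def hasCol (row : List String) (needle : String) : Bool :=
  row.any (fun h => PySem.Str.isIn (pvNorm needle) (pvNorm h))

def isHeaderRow (row : List String) : Bool :=
  hasCol row "RUC" && (hasCol row "FECHA_AFILIACION" || hasCol row "TAMANO")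

-- the loop body of B: state = (emitted blocks, currently open block or none)
def stepB (st : List (Int × List String × List (List String)) ×
    Option (Int × List String × List (List String))) (p : Int × List String) :
    List (Int × List String × List (List String)) ×
    Option (Int × List String × List (List String)) :=
  if isHeaderRow p.2 then
    ((match st.2 with | none => st.1 | some c => st.1 ++ [c]),
     some (p.1, p.2, ([] : List (List String))))
  else
    match st.2 with
    | none => st
    | some c => (st.1, some (c.1, c.2.1, c.2.2 ++ [p.2]))

def detect_blocks_py_alt (data : List (List String)) : List (Int × List String × List (List String)) :=
  let st := (PySem.List.enumerate data 0).foldl stepB ([], none)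
  match st.2 with | none => st.1 | some c => st.1 ++ [c]

-- ===== PRECONDITION & SPEC =====
def Spec_detect_blocks_py (data : List (List String)) (out : List (Int × List String × List (List String))) : Prop := out = detect_blocks_py_alt data
instance (data : List (List String)) (out : List (Int × List String × List (List String))) : Decidable (Spec_detect_blocks_py data out) := by unfold Spec_detect_blocks_py; infer_instance

-- ===== CLAIM (what is proved, stated in full; the proofs are below) =====
def Claim_equal_detect_blocks_py : Prop := ∀ (data : List (List String)), Dom_detect_blocks_py data → Spec_detect_blocks_py data (detect_blocks_py data)

-- ===== LEMMAS AND PROOFS =====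

-- the list of header indices, walked from offset n
def idxsFrom : Int → List (List String) → List Int
  | _, [] => []
  | n, r :: rs => if isHeaderRow r then n :: idxsFrom (n + 1) rs else idxsFrom (n + 1) rs

-- the "next block boundary" A reads from the header-index list (or len(data))
def nextOf (data : List (List String)) : List Int → Int
  | [] => PySem.List.len data
  | h :: _ => h

-- A's second loop as a structural recursion over the header-index list
def pairRec (data : List (List String)) : List Int → List (Int × List String × List (List String))
  | [] => []
  | h :: t => (h, PySem.List.pyGetD data h [],
               PySem.List.slice data (some (h + 1)) (some (nextOf data t))) :: pairRec data t

-- B's loop state, recursively: goClosed = no header seen yet, goOpen = open block (h, hdr, acc)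
mutual
def goOpen : Int → List (List String) → Int → List String → List (List String) →
    List (Int × List String × List (List String))
  | _, [], h, hdr, acc => [(h, hdr, acc)]
  | n, r :: rs, h, hdr, acc =>
      if isHeaderRow r then (h, hdr, acc) :: goOpen (n + 1) rs n r []
      else goOpen (n + 1) rs h hdr (acc ++ [r])
def goClosed : Int → List (List String) → List (Int × List String × List (List String))
  | _, [] => []
  | n, r :: rs => if isHeaderRow r then goOpen (n + 1) rs n r [] else goClosed (n + 1) rs
end

theorem findColAux_nonneg_iff (target : String) (hs : List String) (n : Int) (hn : 0 ≤ n) :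
    (0 ≤ findColAux target hs n) ↔ hs.any (fun h => PySem.Str.isIn target (pvNorm h)) := by
  induction hs generalizing n with
  | nil => simp [findColAux]
  | cons h t ih =>
    by_cases hc : PySem.Chars.isIn target.toList (pvNorm h).toList = true
    · simp [findColAux, hc, hn]
    · simp [findColAux, hc, ih (n + 1) (by omega)]

theorem find_col_nonneg_iff (row : List String) (needle : String) :
    (find_col row needle ≥ 0) ↔ hasCol row needle = true := by
  simpa [find_col, hasCol] using findColAux_nonneg_iff (pvNorm needle) row 0 le_rfl

-- A's per-row header test (empty-row skip included) equals B's isHeaderRow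
theorem stepA_eq (acc : List Int) (n : Int) (r : List String) :
    (if r = [] then acc
     else if find_col r "RUC" ≥ 0 ∧
             (find_col r "FECHA_AFILIACION" ≥ 0 ∨ find_col r "TAMANO" ≥ 0)
          then acc ++ [n] else acc)
    = if isHeaderRow r then acc ++ [n] else acc := by
  by_cases he : r = []
  · simp [he, isHeaderRow, hasCol]
  · simp only [he, if_false]
    by_cases hH : isHeaderRow r = true
    · have := hH
      simp only [isHeaderRow, Bool.and_eq_true, Bool.or_eq_true] at this
      rw [if_pos, if_pos hH]
      rcases this with ⟨h1, h2⟩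
      refine ⟨(find_col_nonneg_iff _ _).2 h1, ?_⟩
      rcases h2 with h2 | h2
      · exact Or.inl ((find_col_nonneg_iff _ _).2 h2)
      · exact Or.inr ((find_col_nonneg_iff _ _).2 h2)
    · rw [if_neg, if_neg hH]
      intro hcon
      apply hH
      simp only [isHeaderRow, Bool.and_eq_true, Bool.or_eq_true]
      rcases hcon with ⟨h1, h2⟩
      refine ⟨(find_col_nonneg_iff _ _).1 h1, ?_⟩
      rcases h2 with h2 | h2
      · exact Or.inl ((find_col_nonneg_iff _ _).1 h2)
      · exact Or.inr ((find_col_nonneg_iff _ _).1 h2)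

theorem fold_idxs (rows : List (List String)) :
    ∀ (n : Int) (acc : List Int),
    (PySem.List.enumerate rows n).foldl (fun acc p =>
      if p.2 = [] then acc
      else if find_col p.2 "RUC" ≥ 0 ∧
              (find_col p.2 "FECHA_AFILIACION" ≥ 0 ∨ find_col p.2 "TAMANO" ≥ 0)
           then acc ++ [p.1] else acc) acc
    = acc ++ idxsFrom n rows := by
  induction rows with
  | nil => intro n acc; simp [PySem.List.enumerate_nil, idxsFrom]
  | cons r rs ih =>
    intro n acc
    rw [PySem.List.enumerate_cons, List.foldl_cons]
    show (PySem.List.enumerate rs (n + 1)).foldl _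
        (if r = [] then acc else if _ then acc ++ [n] else acc) = _
    rw [stepA_eq acc n r, ih (n + 1)]
    by_cases hH : isHeaderRow r <;> simp [idxsFrom, hH]

-- A's second loop equals pairRec: is = full.drop k, the loop looks up full[k+1] as the boundary
theorem fold_blocks (data : List (List String)) (full : List Int) :
    ∀ (is : List Int) (k : Nat) (bs : List (Int × List String × List (List String))),
    full.drop k = is →
    (PySem.List.enumerate is (k : Int)).foldl (fun bs q =>
      let next : Int :=
        if q.1 + 1 < PySem.List.len full
        then PySem.List.pyGetD full (q.1 + 1) 0
        else PySem.List.len data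
      bs ++ [(q.2, PySem.List.pyGetD data q.2 [],
              PySem.List.slice data (some (q.2 + 1)) (some next))]) bs
    = bs ++ pairRec data is := by
  intro is
  induction is with
  | nil => intro k bs _; simp [PySem.List.enumerate_nil, pairRec]
  | cons h t ih =>
    intro k bs hdrop
    have hk : k < full.length := by
      by_contra hge
      rw [List.drop_eq_nil_of_le (by omega)] at hdrop
      exact (List.cons_ne_nil h t) hdrop.symm
    have hfk : full[k] = h := by
      have := List.getElem_drop (xs := full) (i := k) (j := 0) (h := by simp [hdrop])
      simpa [hdrop] using this.symm
    have hdrop1 : full.drop (k + 1) = t := by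
      have : full.drop (k + 1) = (full.drop k).tail := by
        rw [List.tail_drop]
      simp [this, hdrop]
    rw [PySem.List.enumerate_cons, List.foldl_cons]
    have hnext :
        (if (k : Int) + 1 < PySem.List.len full
         then PySem.List.pyGetD full ((k : Int) + 1) 0
         else PySem.List.len data) = nextOf data t := by
      rcases t with _ | ⟨h2, t2⟩
      · have : full.length ≤ k + 1 := by
          by_contra hlt
          have : full.drop (k+1) ≠ [] := by
            simp [List.drop_eq_nil_iff]; omega
          exact this hdrop1
        rw [if_neg]
        · rfl
        · simp [PySem.List.len_eq]; omega
      · have hk1 : k + 1 < full.length := by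
          by_contra hge
          rw [List.drop_eq_nil_of_le (by omega)] at hdrop1
          exact (List.cons_ne_nil h2 t2) hdrop1.symm
        have hfk1 : full[k+1] = h2 := by
          have := List.getElem_drop (xs := full) (i := k + 1) (j := 0) (h := by simp [hdrop1])
          simpa [hdrop1] using this.symm
        rw [if_pos]
        · have : ((k : Int) + 1) = ((k + 1 : Nat) : Int) := by push_cast; ring
          rw [this, PySem.List.pyGetD_natCast]
          simp [List.getD, List.getElem?_eq_getElem hk1, hfk1, nextOf]
        · simp [PySem.List.len_eq]; omega
    have hcast : (k : Int) + 1 = ((k + 1 : Nat) : Int) := by push_cast; ring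
    rw [hnext]
    rw [hcast]
    rw [ih (k + 1) _ hdrop1]
    simp [pairRec]

-- B's fold with state (bs, cur) finalizes to bs ++ (goClosed / goOpen)
def finalize (st : List (Int × List String × List (List String)) ×
    Option (Int × List String × List (List String))) :
    List (Int × List String × List (List String)) :=
  match st.2 with | none => st.1 | some c => st.1 ++ [c]

def goState (n : Int) (rows : List (List String)) :
    Option (Int × List String × List (List String)) →
    List (Int × List String × List (List String))
  | none => goClosed n rows
  | some c => goOpen n rows c.1 c.2.1 c.2.2

theorem foldB_state (rows : List (List String)) :
    ∀ (n : Int) (bs : List (Int × List String × List (List String)))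
      (cur : Option (Int × List String × List (List String))),
    finalize ((PySem.List.enumerate rows n).foldl stepB (bs, cur))
    = bs ++ goState n rows cur := by
  induction rows with
  | nil =>
    intro n bs cur
    rcases cur with _ | c <;> simp [PySem.List.enumerate_nil, finalize, goState, goClosed, goOpen]
  | cons r rs ih =>
    intro n bs cur
    rw [PySem.List.enumerate_cons, List.foldl_cons]
    rcases cur with _ | c
    · by_cases hH : isHeaderRow r = true
      · rw [show stepB (bs, none) (n, r) = (bs, some (n, r, [])) from by simp [stepB, hH]]
        rw [ih (n + 1) bs (some (n, r, []))]
        simp [goState, goClosed, goOpen, hH]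
      · rw [show stepB (bs, none) (n, r) = (bs, none) from by simp [stepB, hH]]
        rw [ih (n + 1) bs none]
        simp [goState, goClosed, hH]
    · by_cases hH : isHeaderRow r = true
      · rw [show stepB (bs, some c) (n, r) = (bs ++ [c], some (n, r, [])) from by
          simp [stepB, hH]]
        rw [ih (n + 1) (bs ++ [c]) (some (n, r, []))]
        simp [goState, goOpen, hH]
      · rw [show stepB (bs, some c) (n, r) = (bs, some (c.1, c.2.1, c.2.2 ++ [r])) from by
          simp [stepB, hH]]
        rw [ih (n + 1) bs (some (c.1, c.2.1, c.2.2 ++ [r]))]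
        simp [goState, goOpen, hH]

-- slice data (h+1) m grows by data[m] as m steps past a non-header row
theorem slice_snoc (data : List (List String)) (h m : Nat) (hm : h + 1 ≤ m) (hlt : m < data.length) :
    PySem.List.slice data (some ((h : Int) + 1)) (some (m : Int)) ++ [data[m]] =
    PySem.List.slice data (some ((h : Int) + 1)) (some ((m : Int) + 1)) := by
  have c1 : (h : Int) + 1 = ((h + 1 : Nat) : Int) := by push_cast; ring
  have c2 : (m : Int) + 1 = ((m + 1 : Nat) : Int) := by push_cast; ring
  rw [c1, c2, PySem.List.slice_natCast, PySem.List.slice_natCast]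
  have hlen : m - (h + 1) < (data.drop (h + 1)).length := by
    simp [List.length_drop]; omega
  have hget : (data.drop (h + 1))[m - (h + 1)] = data[m] := by
    rw [List.getElem_drop]
    congr 1
    omega
  rw [show m + 1 - (h + 1) = (m - (h + 1)) + 1 by omega]
  rw [← List.take_concat_get hlen, hget, List.concat_eq_append]

theorem slice_refl_nil (data : List (List String)) (m : Nat) :
    PySem.List.slice data (some ((m : Int) + 1)) (some ((m : Int) + 1)) = [] := by
  have c1 : (m : Int) + 1 = ((m + 1 : Nat) : Int) := by push_cast; ring
  rw [c1, PySem.List.slice_natCast]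
  simp

-- main correspondence: B's state recursions compute A's pairRec over the header indices
theorem go_eq_pairRec (data : List (List String)) (rows : List (List String)) :
    (∀ (m : Nat), data.drop m = rows →
      goClosed (m : Int) rows = pairRec data (idxsFrom (m : Int) rows)) ∧
    (∀ (m h : Nat) (hdr : List String), data.drop m = rows → h + 1 ≤ m → h < data.length →
      data[h]? = some hdr →
      goOpen (m : Int) rows (h : Int) hdr
        (PySem.List.slice data (some ((h : Int) + 1)) (some (m : Int)))
      = pairRec data ((h : Int) :: idxsFrom (m : Int) rows)) := by
  induction rows with
  | nil =>
    constructor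
    · intro m _; simp [goClosed, idxsFrom, pairRec]
    · intro m h hdr hdrop hm hh hget
      have hml : data.length ≤ m := by
        by_contra hlt
        have : data.drop m ≠ [] := by simp [List.drop_eq_nil_iff]; omega
        exact this hdrop
      simp only [goClosed, goOpen, idxsFrom, pairRec, nextOf]
      have hslice : PySem.List.slice data (some ((h : Int) + 1)) (some (m : Int)) =
          PySem.List.slice data (some ((h : Int) + 1)) (some (PySem.List.len data)) := by
        have c1 : (h : Int) + 1 = ((h + 1 : Nat) : Int) := by push_cast; ring
        rw [PySem.List.len_eq, c1, PySem.List.slice_natCast, PySem.List.slice_natCast]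
        rw [List.take_of_length_le (by rw [List.length_drop]; omega),
            List.take_of_length_le (by rw [List.length_drop])]
      rw [hslice]
      simp [List.getD, hget]
  | cons r rs ih =>
    have hstep : ∀ (m : Nat), data.drop m = r :: rs →
        m < data.length ∧ data[m]? = some r ∧ data.drop (m + 1) = rs := by
      intro m hdrop
      have hk : m < data.length := by
        by_contra hge
        rw [List.drop_eq_nil_of_le (by omega)] at hdrop
        exact (List.cons_ne_nil r rs) hdrop.symm
      refine ⟨hk, ?_, ?_⟩
      · rw [List.getElem?_eq_getElem hk]
        have := List.getElem_drop (xs := data) (i := m) (j := 0) (h := by simp [hdrop])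
        simp only [hdrop] at this
        simpa using this.symm
      · rw [← List.tail_drop, hdrop]; rfl
    constructor
    · intro m hdrop
      obtain ⟨hk, hget, hdrop1⟩ := hstep m hdrop
      by_cases hH : isHeaderRow r
      · simp only [goClosed, idxsFrom, hH, if_true]
        have this := (ih.2) (m + 1) m r hdrop1 (by omega) hk hget
        have hc : ((m + 1 : Nat) : Int) = (m : Int) + 1 := by push_cast; ring
        rw [hc, slice_refl_nil data m] at this
        exact this
      · simp only [goClosed, idxsFrom, hH, if_false]
        have := (ih.1) (m + 1) hdrop1
        have hc : ((m + 1 : Nat) : Int) = (m : Int) + 1 := by push_cast; ring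
        rw [hc] at this
        exact this
    · intro m h hdr hdrop hm hh hget
      obtain ⟨hk, hgetm, hdrop1⟩ := hstep m hdrop
      have hgm : data[m]'hk = r := by
        rw [List.getElem?_eq_getElem hk] at hgetm
        exact Option.some.inj hgetm
      have hc : ((m + 1 : Nat) : Int) = (m : Int) + 1 := by push_cast; ring
      by_cases hH : isHeaderRow r
      · simp only [goOpen, idxsFrom, hH, if_true]
        have htail := (ih.2) (m + 1) m r hdrop1 (by omega) hk
          (by rw [List.getElem?_eq_getElem hk]; exact congrArg some hgm)
        rw [hc, slice_refl_nil data m] at htail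
        rw [htail]
        simp only [pairRec, nextOf]
        simp [List.getD, hget]
      · simp only [goOpen, idxsFrom, hH, if_false]
        have hsn := slice_snoc data h m hm hk
        rw [hgm] at hsn
        rw [hsn]
        have := (ih.2) (m + 1) h hdr hdrop1 (by omega) hh hget
        rw [hc] at this
        exact this

-- ===== VERDICT (by name: the statement is the Claim_ definition above) =====
theorem detect_blocks_py_spec : Claim_equal_detect_blocks_py := by
  intro data _
  show detect_blocks_py data = detect_blocks_py_alt data
  have hA : detect_blocks_py data = pairRec data (idxsFrom 0 data) := by
    unfold detect_blocks_py
    rw [fold_idxs data 0 []]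
    simp only [List.nil_append]
    exact fold_blocks data (idxsFrom 0 data) (idxsFrom 0 data) 0 [] rfl
  have hB : detect_blocks_py_alt data = goClosed 0 data := by
    unfold detect_blocks_py_alt
    have := foldB_state data 0 [] none
    simpa [finalize, goState] using this
  rw [hA, hB]
  have := (go_eq_pairRec data data).1 0 (by simp)
  simpa using this.symm
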